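-- pv_equiv track=rewrite | github.com/gopinaath/scraper | grouped_array.py | group_by_pattern
-- ===== SOURCE A (Python) =====
-- def group_by_pattern(array, pattern):
--     grouped_array = []
--     group = []
--
--     for element in array:
--         if element.startswith(pattern):
--             if group:
--                 grouped_array.append(group)
--                 group = []
--             group.append(element)
--         else:
--             group.append(element)
--
--     if group:
--         grouped_array.append(group)
--
--     return grouped_array
-- ===== SOURCE B (Python) =====
-- def group_by_pattern(array, pattern):
--     # Index-based: for each group start, scan forward to the next matching
--     # element (the next group's start) and slice the group out directly.
--     n = len(array)
--     result = []
--     start = 0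
--     while start < n:
--         end = start + 1
--         while end < n and not array[end].startswith(pattern):
--             end += 1
--         result.append(list(array[start:end]))
--         start = end
--     return result
-- ===== Notes on version B (the rewrite author's own statement) =====
-- stated objective: alternative
-- what changed: Replaces A's single accumulate-and-flush pass over elements with an index-based two-level scan: an outer loop over group start positions and an inner scan that finds each group's end, slicing the group out of the array directly.
import Mathlib
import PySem

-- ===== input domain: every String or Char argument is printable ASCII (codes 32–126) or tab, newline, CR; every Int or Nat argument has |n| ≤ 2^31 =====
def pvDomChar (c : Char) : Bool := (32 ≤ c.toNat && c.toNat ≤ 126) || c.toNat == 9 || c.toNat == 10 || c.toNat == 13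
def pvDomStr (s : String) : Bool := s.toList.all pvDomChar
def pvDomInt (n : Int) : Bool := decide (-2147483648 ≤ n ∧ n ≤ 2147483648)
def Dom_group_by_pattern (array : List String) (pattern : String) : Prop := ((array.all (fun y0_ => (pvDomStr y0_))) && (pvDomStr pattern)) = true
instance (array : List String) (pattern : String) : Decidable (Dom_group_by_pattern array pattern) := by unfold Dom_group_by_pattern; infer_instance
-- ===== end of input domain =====

-- B replaces A's accumulate-and-flush element pass with an index-based two-level scan
-- (outer loop over group starts, inner scan to each group's end, then a slice per group).

-- ===== PORT A =====
def groupStepA (pattern : String) (st : List (List String) × List String) (element : String) :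
    List (List String) × List String :=
  if PySem.Str.startswith element pattern then
    let st' := if st.2.isEmpty then st else (st.1 ++ [st.2], ([] : List String))
    (st'.1, st'.2 ++ [element])
  else
    (st.1, st.2 ++ [element])

def group_by_pattern (array : List String) (pattern : String) : List (List String) :=
  let st := array.foldl (groupStepA pattern) ([], [])
  if st.2.isEmpty then st.1 else st.1 ++ [st.2]

-- ===== PORT B =====
-- inner while: advance `e` while e < n and array[e] does not start with pattern
def scanEnd (pattern : String) (array : List String) (n e : Nat) : Nat :=
  if h : e < n then
    match array[e]? with
    | some x => if PySem.Str.startswith x pattern then e else scanEnd pattern array n (e + 1)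
    | none => e
  else e
termination_by n - e
decreasing_by omega

-- the inner scan never moves backwards (cited by buildGroups' decreasing_by)
theorem scanEnd_ge (pattern : String) (array : List String) (n : Nat) :
    ∀ e, e ≤ scanEnd pattern array n e := by
  intro e
  induction hm : n - e using Nat.strong_induction_on generalizing e with
  | _ m ih =>
    rw [scanEnd]
    by_cases h : e < n
    · rw [dif_pos h]
      cases hx : array[e]? with
      | none => simp
      | some x =>
        by_cases hs : PySem.Chars.startswith x.toList pattern.toList = true
        · simp [hs]
        · have := ih (n - (e + 1)) (by omega) (e + 1) rfl
          simp only [Bool.not_eq_true] at hs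
          simp [hs]
          omega
    · rw [dif_neg h]

-- outer while over group start positions
def buildGroups (pattern : String) (array : List String) (n start : Nat) : List (List String) :=
  if h : start < n then
    let e := scanEnd pattern array n (start + 1)
    ((array.drop start).take (e - start)) :: buildGroups pattern array n e
  else []
termination_by n - start
decreasing_by
  have : start + 1 ≤ scanEnd pattern array n (start + 1) := scanEnd_ge pattern array n (start + 1)
  omega

def group_by_pattern_alt (array : List String) (pattern : String) : List (List String) :=
  buildGroups pattern array array.length 0

-- ===== PRECONDITION & SPEC =====
def Spec_group_by_pattern (array : List String) (pattern : String) (out : List (List String)) : Prop := out = group_by_pattern_alt array pattern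
instance (array : List String) (pattern : String) (out : List (List String)) : Decidable (Spec_group_by_pattern array pattern out) := by unfold Spec_group_by_pattern; infer_instance

-- ===== CLAIM (what is proved, stated in full; the proofs are below) =====
def Claim_equal_group_by_pattern : Prop := ∀ (array : List String) (pattern : String), Dom_group_by_pattern array pattern → Spec_group_by_pattern array pattern (group_by_pattern array pattern)

-- ===== LEMMAS AND PROOFS =====

-- Reference grouping: each group is its first element plus the following non-matching ones.
def gspec (pattern : String) : List String → List (List String)
  | [] => []
  | x :: t =>
      (x :: t.takeWhile (fun e => !PySem.Str.startswith e pattern)) ::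
        gspec pattern (t.dropWhile (fun e => !PySem.Str.startswith e pattern))
termination_by xs => xs.length
decreasing_by
  simpa using Nat.lt_succ_of_le (List.length_dropWhile_le _ _)

def finishA (st : List (List String) × List String) : List (List String) :=
  if st.2.isEmpty then st.1 else st.1 ++ [st.2]

theorem finishA_append (hs : List (List String)) (st : List (List String) × List String) :
    finishA (hs ++ st.1, st.2) = hs ++ finishA st := by
  unfold finishA
  split_ifs <;> simp

-- A's loop only ever appends to the accumulator of finished groups.
theorem foldA_prefix (pattern : String) (t : List String) :
    ∀ (ga : List (List String)) (g : List String),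
      t.foldl (groupStepA pattern) (ga, g) =
        (ga ++ (t.foldl (groupStepA pattern) ([], g)).1,
          (t.foldl (groupStepA pattern) ([], g)).2) := by
  induction t with
  | nil => intro ga g; simp
  | cons z t ih =>
      intro ga g
      rw [List.foldl_cons, List.foldl_cons]
      by_cases hz : PySem.Chars.startswith z.toList pattern.toList = true
      · by_cases hg : g = []
        · have e1 : groupStepA pattern (ga, g) z = (ga, [z]) := by
            simp [groupStepA, hz, hg]
          have e2 : groupStepA pattern (([] : List (List String)), g) z = ([], [z]) := by
            simp [groupStepA, hz, hg]
          rw [e1, e2]; exact ih ga [z]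
        · have e1 : groupStepA pattern (ga, g) z = (ga ++ [g], [z]) := by
            simp [groupStepA, hz, hg]
          have e2 : groupStepA pattern (([] : List (List String)), g) z = ([g], [z]) := by
            simp [groupStepA, hz, hg]
          rw [e1, e2, ih (ga ++ [g]) [z], ih [g] [z]]
          simp
      · have e1 : groupStepA pattern (ga, g) z = (ga, g ++ [z]) := by
          simp [groupStepA, hz]
        have e2 : groupStepA pattern (([] : List (List String)), g) z = ([], g ++ [z]) := by
          simp [groupStepA, hz]
        rw [e1, e2]; exact ih ga (g ++ [z])

-- A's loop from a pending nonempty group g: g absorbs the leading non-matching elements,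
-- the rest is grouped by gspec.
theorem foldA_pending (pattern : String) (t : List String) :
    ∀ g : List String, g ≠ [] →
      finishA (t.foldl (groupStepA pattern) ([], g)) =
        (g ++ t.takeWhile (fun e => !PySem.Str.startswith e pattern)) ::
          gspec pattern (t.dropWhile (fun e => !PySem.Str.startswith e pattern)) := by
  induction t with
  | nil =>
      intro g hg
      simp [finishA, List.isEmpty_iff, hg, gspec]
  | cons y t ih =>
      intro g hg
      by_cases hy : PySem.Chars.startswith y.toList pattern.toList = true
      · have hstep : (y :: t).foldl (groupStepA pattern) ([], g) =
            t.foldl (groupStepA pattern) ([g], [y]) := by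
          simp [groupStepA, hy, hg]
        have htw : (y :: t).takeWhile (fun e => !PySem.Str.startswith e pattern) = [] := by
          simp [hy]
        have hdw : (y :: t).dropWhile (fun e => !PySem.Str.startswith e pattern) = y :: t := by
          simp [hy]
        rw [htw, hdw, gspec, hstep, foldA_prefix pattern t [g] [y]]
        have := finishA_append [g] (t.foldl (groupStepA pattern) ([], [y]))
        rw [this, ih [y] (by simp)]
        simp
      · have hstep : (y :: t).foldl (groupStepA pattern) ([], g) =
            t.foldl (groupStepA pattern) ([], g ++ [y]) := by
          simp [groupStepA, hy]
        have htw : (y :: t).takeWhile (fun e => !PySem.Str.startswith e pattern) =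
            y :: t.takeWhile (fun e => !PySem.Str.startswith e pattern) := by
          simp [hy]
        have hdw : (y :: t).dropWhile (fun e => !PySem.Str.startswith e pattern) =
            t.dropWhile (fun e => !PySem.Str.startswith e pattern) := by
          simp [hy]
        rw [hstep, ih (g ++ [y]) (by simp), htw, hdw]
        simp

-- A computes gspec.
theorem A_eq_gspec (array : List String) (pattern : String) :
    group_by_pattern array pattern = gspec pattern array := by
  have hA : group_by_pattern array pattern =
      finishA (array.foldl (groupStepA pattern) ([], [])) := rfl
  cases array with
  | nil => simp [hA, finishA, gspec]
  | cons x t =>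
      have hstep : (x :: t).foldl (groupStepA pattern) ([], []) =
          t.foldl (groupStepA pattern) ([], [x]) := by
        by_cases hx : PySem.Chars.startswith x.toList pattern.toList = true <;>
          simp [groupStepA, hx]
      rw [hA, hstep, foldA_pending pattern t [x] (by simp), gspec]
      simp

-- The inner scan stops at k plus the length of the leading non-matching run of array.drop k.
theorem scanEnd_spec (pattern : String) (array : List String) :
    ∀ k, scanEnd pattern array array.length k =
      k + ((array.drop k).takeWhile (fun e => !PySem.Str.startswith e pattern)).length := by
  intro k
  induction hn : array.length - k using Nat.strong_induction_on generalizing k with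
  | _ m ih =>
    rw [scanEnd]
    by_cases h : k < array.length
    · have hx : array[k]? = some array[k] := List.getElem?_eq_getElem h
      have hdrop : array.drop k = array[k] :: array.drop (k + 1) :=
        List.drop_eq_getElem_cons h
      rw [dif_pos h, hx]
      show (if PySem.Str.startswith array[k] pattern = true then k
            else scanEnd pattern array array.length (k + 1)) =
          k + ((array.drop k).takeWhile (fun e => !PySem.Str.startswith e pattern)).length
      by_cases hs : PySem.Str.startswith array[k] pattern = true
      · rw [if_pos hs, hdrop, List.takeWhile_cons_of_neg (by simpa using hs)]
        simp
      · have hrec := ih (array.length - (k+1)) (by omega) (k+1) rfl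
        rw [if_neg hs, hdrop,
          List.takeWhile_cons_of_pos (by simpa using hs), hrec]
        simp
        omega
    · have hd : array.drop k = [] := List.drop_eq_nil_of_le (by omega)
      rw [dif_neg h, hd]
      simp

-- a list minus its leading p-run is its dropWhile
theorem drop_length_takeWhile {α : Type} (p : α → Bool) (l : List α) :
    l.drop (l.takeWhile p).length = l.dropWhile p := by
  induction l with
  | nil => simp
  | cons a t ih =>
      by_cases hp : p a = true
      · simp [List.takeWhile_cons_of_pos hp, List.dropWhile_cons_of_pos hp, ih]
      · simp only [Bool.not_eq_true] at hp
        simp [hp]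

-- B's outer loop from position start computes gspec of the suffix.
theorem buildGroups_spec (pattern : String) (array : List String) :
    ∀ start, buildGroups pattern array array.length start = gspec pattern (array.drop start) := by
  intro start
  induction hn : array.length - start using Nat.strong_induction_on generalizing start with
  | _ m ih =>
    rw [buildGroups]
    by_cases h : start < array.length
    · rw [dif_pos h]
      show ((array.drop start).take (scanEnd pattern array array.length (start+1) - start)) ::
          buildGroups pattern array array.length (scanEnd pattern array array.length (start+1)) =
          gspec pattern (array.drop start)
      have hdrop : array.drop start = array[start] :: array.drop (start + 1) :=
        List.drop_eq_getElem_cons h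
      set t := array.drop (start + 1) with ht
      set P : String → Bool := fun e => !PySem.Str.startswith e pattern with hP
      have he : scanEnd pattern array array.length (start + 1) =
          (start + 1) + (t.takeWhile P).length := scanEnd_spec pattern array (start + 1)
      -- the slice is the group
      have htake : (array.drop start).take (scanEnd pattern array array.length (start+1) - start) =
          array[start] :: t.takeWhile P := by
        rw [hdrop, he]
        have h1 : start + 1 + (t.takeWhile P).length - start = (t.takeWhile P).length + 1 := by
          omega
        rw [h1, List.take_succ_cons]
        congr 1
        exact ((List.prefix_iff_eq_take.mp (List.takeWhile_prefix P))).symm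
      -- the rest is the dropWhile suffix
      have hrest : array.drop (scanEnd pattern array array.length (start+1)) = t.dropWhile P := by
        rw [he]
        have h2 : array.drop (start + 1 + (t.takeWhile P).length) =
            (array.drop (start+1)).drop (t.takeWhile P).length := by
          rw [List.drop_drop]
        rw [h2, ← ht]
        exact drop_length_takeWhile P t
      have hge : start + 1 ≤ scanEnd pattern array array.length (start + 1) :=
        scanEnd_ge pattern array array.length (start + 1)
      have hrec := ih (array.length - scanEnd pattern array array.length (start+1)) (by omega)
        (scanEnd pattern array array.length (start+1)) rfl
      rw [htake, hrec, hrest, hdrop, gspec, ← hP]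
    · rw [dif_neg h]
      have hd : array.drop start = [] := List.drop_eq_nil_of_le (by omega)
      rw [hd]
      simp [gspec]

-- B computes gspec.
theorem B_eq_gspec (array : List String) (pattern : String) :
    group_by_pattern_alt array pattern = gspec pattern array := by
  have : group_by_pattern_alt array pattern = buildGroups pattern array array.length 0 := rfl
  rw [this, buildGroups_spec]
  simp

-- ===== VERDICT (by name: the statement is the Claim_ definition above) =====
theorem group_by_pattern_spec : Claim_equal_group_by_pattern := by
  intro array pattern _
  unfold Spec_group_by_pattern
  rw [A_eq_gspec, B_eq_gspec]
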